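-- pv_equiv track=rewrite | github.com/iamtariqueanjum/ReviewPilot | app/core/services/review_service.py | get_new_file_line_number
-- ===== SOURCE A (Python) =====
-- def get_new_file_line_number(file_lines, target, approx_line):
--     n = len(file_lines)
--     target = target.strip()
--     approx_line = min(max(approx_line, 1), len(file_lines))
--     for i in range(approx_line - 1, n):
--         if file_lines[i].strip() == target:
--             return i + 1
--     for i in range(approx_line - 2, -1, -1):
--         if file_lines[i].strip() == target:
--             return i + 1
--     return approx_line
-- ===== SOURCE B (Python) =====
-- def get_new_file_line_number(file_lines, target, approx_line):
--     t = target.strip()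
--     start = min(max(approx_line, 1), len(file_lines))
--     matches = [i for i, line in enumerate(file_lines) if line.strip() == t]
--     forward = [i for i in matches if i >= start - 1]
--     if forward:
--         return forward[0] + 1
--     if matches:
--         return matches[-1] + 1
--     return start
-- ===== Notes on version B (the rewrite author's own statement) =====
-- stated objective: alternative
-- what changed: Replaced A's two directional early-exit scans (forward from the clamped line, then backward) with a single collect-all-matching-indices pass followed by a selection: first match at or after the clamped line, else the last match before it.
import Mathlib
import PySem

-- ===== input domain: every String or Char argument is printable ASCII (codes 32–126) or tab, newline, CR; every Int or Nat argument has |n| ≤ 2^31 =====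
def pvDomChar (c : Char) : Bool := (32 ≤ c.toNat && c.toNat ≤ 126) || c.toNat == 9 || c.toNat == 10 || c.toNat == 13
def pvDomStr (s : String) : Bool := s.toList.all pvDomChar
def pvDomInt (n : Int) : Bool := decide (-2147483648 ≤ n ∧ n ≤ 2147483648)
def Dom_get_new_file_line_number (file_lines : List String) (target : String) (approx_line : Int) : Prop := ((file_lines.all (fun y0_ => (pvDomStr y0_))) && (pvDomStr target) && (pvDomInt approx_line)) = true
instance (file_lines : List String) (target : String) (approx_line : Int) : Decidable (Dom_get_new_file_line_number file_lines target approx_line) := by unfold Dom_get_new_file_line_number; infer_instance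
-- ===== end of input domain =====

-- B replaces A's two directional early-exit scans by one full collect-all-matches pass
-- followed by a selection (first match at/after the clamped line, else last match before it);
-- objective: alternative decomposition, same asymptotic cost.

-- ===== PORT A =====
def get_new_file_line_number (file_lines : List String) (target : String) (approx_line : Int) : Int :=
  let n : Int := PySem.List.len file_lines
  let t := PySem.Str.strip target
  let approx : Int := min (max approx_line 1) (PySem.List.len file_lines)
  match (PySem.List.pyRange (approx - 1) n).find?
      (fun i => (PySem.List.pyGet? file_lines i).map PySem.Str.strip == some t) with
  | some i => i + 1
  | none =>
    match (PySem.List.pyRange (approx - 2) (-1) (-1)).find?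
        (fun i => (PySem.List.pyGet? file_lines i).map PySem.Str.strip == some t) with
    | some i => i + 1
    | none => approx

-- ===== PORT B =====
def get_new_file_line_number_alt (file_lines : List String) (target : String) (approx_line : Int) : Int :=
  let t := PySem.Str.strip target
  let start : Int := min (max approx_line 1) (PySem.List.len file_lines)
  let ms := ((PySem.List.enumerate file_lines).filter
      (fun p => PySem.Str.strip p.2 == t)).map (fun p => p.1)
  let forward := ms.filter (fun i => decide (start - 1 ≤ i))
  match forward with
  | i :: _ => i + 1
  | [] =>
    match ms.getLast? with
    | some j => j + 1
    | none => start

-- ===== PRECONDITION & SPEC =====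
-- A raises IndexError on empty file_lines (the clamped forward range is range(-1, 0),
-- so file_lines[-1] is evaluated); only those inputs are excluded.
def Pre_get_new_file_line_number (file_lines : List String) (target : String) (approx_line : Int) : Prop := file_lines ≠ []
instance (file_lines : List String) (target : String) (approx_line : Int) : Decidable (Pre_get_new_file_line_number file_lines target approx_line) := by unfold Pre_get_new_file_line_number; infer_instance
def pvWitness_get_new_file_line_number : List String × String × Int := (["x", " a ", "b"], "a", 2)

def Spec_get_new_file_line_number (file_lines : List String) (target : String) (approx_line : Int) (out : Int) : Prop := out = get_new_file_line_number_alt file_lines target approx_line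
instance (file_lines : List String) (target : String) (approx_line : Int) (out : Int) : Decidable (Spec_get_new_file_line_number file_lines target approx_line out) := by unfold Spec_get_new_file_line_number; infer_instance

-- ===== CLAIM (what is proved, stated in full; the proofs are below) =====
def Claim_equal_get_new_file_line_number : Prop := ∀ (file_lines : List String) (target : String) (approx_line : Int), Dom_get_new_file_line_number file_lines target approx_line → Pre_get_new_file_line_number file_lines target approx_line → Spec_get_new_file_line_number file_lines target approx_line (get_new_file_line_number file_lines target approx_line)

-- ===== LEMMAS AND PROOFS =====

-- B's match-index list equals the filter of [0, n) by the index predicate A scans with.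
theorem pv_matches_eq (fl : List String) (t : String) :
    ((PySem.List.enumerate fl).filter (fun p => PySem.Str.strip p.2 == t)).map (fun p => p.1)
      = (PySem.List.pyRange 0 ((fl.length : Int))).filter
          (fun i => (PySem.List.pyGet? fl i).map PySem.Str.strip == some t) := by
  rw [PySem.List.enumerate_eq_map_pyRange fl "", List.filter_map, List.map_map]
  simp only [Function.comp_def, PySem.List.len_eq]
  rw [List.map_id']
  apply List.filter_congr
  intro i hi
  rw [PySem.List.mem_pyRange_one] at hi
  have h2 : i < (fl.length : Int) := by
    have := hi.2; simpa [PySem.List.len_eq] using this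
  rw [PySem.List.pyGet?_of_nonneg fl hi.1,
      PySem.List.pyGetD_eq_getElem fl "" hi.1 h2]
  have hlt : i.toNat < fl.length := by omega
  simp [List.getElem?_eq_getElem hlt]

theorem pv_core (m a : Int) (q : Int → Bool) (ha1 : 1 ≤ a) (ha2 : a ≤ m) :
    (match (PySem.List.pyRange (a - 1) m).find? q with
     | some i => i + 1
     | none =>
       match (PySem.List.pyRange (a - 2) (-1) (-1)).find? q with
       | some i => i + 1
       | none => a) =
    (match ((PySem.List.pyRange 0 m).filter q).filter (fun i => decide (a - 1 ≤ i)) with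
     | i :: _ => i + 1
     | [] =>
       match ((PySem.List.pyRange 0 m).filter q).getLast? with
       | some j => j + 1
       | none => a) := by
  have hsplit : PySem.List.pyRange 0 m
      = PySem.List.pyRange 0 (a - 1) ++ PySem.List.pyRange (a - 1) m :=
    PySem.List.pyRange_one_append 0 (a - 1) m (by omega) (by omega)
  rw [hsplit, List.filter_append, List.filter_append]
  have h1 : ((PySem.List.pyRange 0 (a - 1)).filter q).filter (fun i => decide (a - 1 ≤ i)) = [] := by
    rw [List.filter_eq_nil_iff]
    intro x hx
    have := (List.mem_filter.mp hx).1
    rw [PySem.List.mem_pyRange_one] at this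
    simp; omega
  have h2 : ((PySem.List.pyRange (a - 1) m).filter q).filter (fun i => decide (a - 1 ≤ i))
      = (PySem.List.pyRange (a - 1) m).filter q := by
    rw [List.filter_eq_self]
    intro x hx
    have := (List.mem_filter.mp hx).1
    rw [PySem.List.mem_pyRange_one] at this
    simp; omega
  rw [h1, h2, List.nil_append]
  have hfind : (PySem.List.pyRange (a - 1) m).find? q
      = ((PySem.List.pyRange (a - 1) m).filter q).head? := (List.head?_filter).symm
  have hback : (PySem.List.pyRange (a - 2) (-1) (-1)).find? q
      = ((PySem.List.pyRange 0 (a - 1)).filter q).getLast? := by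
    rw [PySem.List.pyRange_neg_one_eq_reverse,
        show ((-1 : Int) + 1) = 0 by norm_num, show a - 2 + 1 = a - 1 by ring,
        ← List.head?_filter, List.filter_reverse, List.head?_reverse]
  rw [hfind, hback]
  cases hcase : (PySem.List.pyRange (a - 1) m).filter q with
  | cons i tl => simp
  | nil =>
    simp only [List.head?_nil, List.append_nil]

theorem pv_main (fl : List String) (tg : String) (ap : Int) (hpre : fl ≠ []) :
    get_new_file_line_number fl tg ap = get_new_file_line_number_alt fl tg ap := by
  have hn : 1 ≤ (fl.length : Int) := by
    have := List.length_pos_of_ne_nil hpre; omega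
  unfold get_new_file_line_number get_new_file_line_number_alt
  simp only [PySem.List.len_eq]
  rw [pv_matches_eq fl (PySem.Str.strip tg)]
  exact pv_core (fl.length : Int) (min (max ap 1) (fl.length : Int)) _ (by omega) (by omega)

-- ===== VERDICT (by name: the statement is the Claim_ definition above) =====
theorem get_new_file_line_number_spec : Claim_equal_get_new_file_line_number := by
  intro fl tg ap _ hpre
  unfold Spec_get_new_file_line_number
  exact pv_main fl tg ap hpre
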